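-- pv_equiv track=rewrite | github.com/ArchonMegalon/fleet | scripts/materialize_next90_m125_fleet_signal_cluster_queue.py | _infer_routing_outcome
-- ===== SOURCE A (Python) =====
-- from typing import Any, Dict, Iterable, List
--
-- def _infer_routing_outcome(summary: str, source_families: Iterable[str]) -> str:
--     lowered = summary.lower()
--     families = {str(value) for value in source_families}
--     if "crash" in lowered or "account" in lowered or "private" in lowered or "spoiler" in lowered:
--         return "support knowledge or closure fix"
--     if "guide" in lowered or "copy" in lowered or "content" in lowered or "publication" in lowered:
--         return "docs/help fix"
--     if "visibility" in lowered or "search" in lowered or "crawl" in lowered: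
--         return "docs/help fix"
--     if "support" in lowered or "help" in lowered or "install" in lowered:
--         return "support knowledge or closure fix"
--     if "feature" in lowered or "demand" in lowered or "roadmap" in lowered or "queue" in lowered or "horizon" in lowered:
--         return "queue/package fix"
--     if "release" in lowered or "promise" in lowered:
--         return "policy update"
--     if "public-guide" in families:
--         return "docs/help fix"
--     return "defer or reject with explicit rationale"
-- ===== SOURCE B (Python) =====
-- _KEYWORD_PRIORITY = {
--     "crash": 0, "account": 0, "private": 0, "spoiler": 0,
--     "guide": 1, "copy": 1, "content": 1, "publication": 1,
--     "visibility": 2, "search": 2, "crawl": 2,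
--     "support": 3, "help": 3, "install": 3,
--     "feature": 4, "demand": 4, "roadmap": 4, "queue": 4, "horizon": 4,
--     "release": 5, "promise": 5,
-- }
--
-- _OUTCOMES = [
--     "support knowledge or closure fix",
--     "docs/help fix",
--     "docs/help fix",
--     "support knowledge or closure fix",
--     "queue/package fix",
--     "policy update",
-- ]
--
--
-- def _infer_routing_outcome(summary, source_families):
--     lowered = summary.lower()
--     best = min(
--         (priority for keyword, priority in _KEYWORD_PRIORITY.items() if keyword in lowered),
--         default=None,
--     )
--     if best is not None:
--         return _OUTCOMES[best]
--     if "public-guide" in {str(value) for value in source_families}: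
--         return "docs/help fix"
--     return "defer or reject with explicit rationale"
-- ===== Notes on version B (the rewrite author's own statement) =====
-- stated objective: alternative
-- what changed: Replaces A's ordered short-circuit if-ladder with a priority aggregation: every keyword is mapped to a numeric priority, B scans all keywords once and takes the minimum priority among those occurring in the lowered summary, then indexes an outcome table; the set-membership fallback and default stay.
import Mathlib
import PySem

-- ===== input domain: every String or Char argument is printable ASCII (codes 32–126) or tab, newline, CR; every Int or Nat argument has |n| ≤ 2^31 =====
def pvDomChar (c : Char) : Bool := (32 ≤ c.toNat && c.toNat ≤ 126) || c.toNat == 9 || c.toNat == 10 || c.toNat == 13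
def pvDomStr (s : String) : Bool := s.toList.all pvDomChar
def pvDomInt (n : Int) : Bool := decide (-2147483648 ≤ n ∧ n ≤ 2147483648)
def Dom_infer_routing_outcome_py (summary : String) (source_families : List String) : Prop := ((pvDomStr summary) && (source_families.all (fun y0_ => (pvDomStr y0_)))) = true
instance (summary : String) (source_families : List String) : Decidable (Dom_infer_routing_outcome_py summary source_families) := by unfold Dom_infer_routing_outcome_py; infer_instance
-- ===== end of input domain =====

-- B replaces A's ordered short-circuit keyword ladder by a priority aggregation: every keyword
-- carries a numeric priority, B takes the MINIMUM priority among all keywords occurring in the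
-- lowered summary and maps it to an outcome; objective: alternative (same cost, different algorithm).

-- ===== PORT A =====
def infer_routing_outcome_py (summary : String) (source_families : List String) : String :=
  let lowered := PySem.Str.lower summary
  let families : PySem.Set String := PySem.Set.ofList source_families
  if PySem.Str.isIn "crash" lowered || PySem.Str.isIn "account" lowered || PySem.Str.isIn "private" lowered || PySem.Str.isIn "spoiler" lowered then
    "support knowledge or closure fix"
  else if PySem.Str.isIn "guide" lowered || PySem.Str.isIn "copy" lowered || PySem.Str.isIn "content" lowered || PySem.Str.isIn "publication" lowered then
    "docs/help fix"
  else if PySem.Str.isIn "visibility" lowered || PySem.Str.isIn "search" lowered || PySem.Str.isIn "crawl" lowered then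
    "docs/help fix"
  else if PySem.Str.isIn "support" lowered || PySem.Str.isIn "help" lowered || PySem.Str.isIn "install" lowered then
    "support knowledge or closure fix"
  else if PySem.Str.isIn "feature" lowered || PySem.Str.isIn "demand" lowered || PySem.Str.isIn "roadmap" lowered || PySem.Str.isIn "queue" lowered || PySem.Str.isIn "horizon" lowered then
    "queue/package fix"
  else if PySem.Str.isIn "release" lowered || PySem.Str.isIn "promise" lowered then
    "policy update"
  else if PySem.Set.contains families "public-guide" then
    "docs/help fix"
  else
    "defer or reject with explicit rationale"

-- ===== PORT B =====
-- keyword -> priority table (insertion order of Source B's dict)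
def pvKeywordPriority : List (String × Nat) :=
  [ ("crash", 0), ("account", 0), ("private", 0), ("spoiler", 0),
    ("guide", 1), ("copy", 1), ("content", 1), ("publication", 1),
    ("visibility", 2), ("search", 2), ("crawl", 2),
    ("support", 3), ("help", 3), ("install", 3),
    ("feature", 4), ("demand", 4), ("roadmap", 4), ("queue", 4), ("horizon", 4),
    ("release", 5), ("promise", 5) ]

def pvOutcomes : List String :=
  [ "support knowledge or closure fix",
    "docs/help fix",
    "docs/help fix",
    "support knowledge or closure fix",
    "queue/package fix",
    "policy update" ]

-- running minimum (Python's min over the generator of matched priorities)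
def pvMerge (acc : Option Nat) (p : Nat) : Option Nat :=
  match acc with
  | none => some p
  | some q => some (min q p)

def pvStep (lowered : String) (acc : Option Nat) (kp : String × Nat) : Option Nat :=
  if PySem.Str.isIn kp.1 lowered then pvMerge acc kp.2 else acc

def infer_routing_outcome_py_alt (summary : String) (source_families : List String) : String :=
  let lowered := PySem.Str.lower summary
  let best : Option Nat := pvKeywordPriority.foldl (pvStep lowered) none
  match best with
  | some p => pvOutcomes.getD p ""   -- _OUTCOMES[best]; p < 6 always, so the index is in range
  | none =>
    if PySem.Set.contains (PySem.Set.ofList source_families) "public-guide" then "docs/help fix"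
    else "defer or reject with explicit rationale"

-- ===== PRECONDITION & SPEC =====
def Spec_infer_routing_outcome_py (summary : String) (source_families : List String) (out : String) : Prop := out = infer_routing_outcome_py_alt summary source_families
instance (summary : String) (source_families : List String) (out : String) : Decidable (Spec_infer_routing_outcome_py summary source_families out) := by unfold Spec_infer_routing_outcome_py; infer_instance

-- ===== CLAIM =====
def Claim_equal_infer_routing_outcome_py : Prop := ∀ (summary : String) (source_families : List String), Dom_infer_routing_outcome_py summary source_families → Spec_infer_routing_outcome_py summary source_families (infer_routing_outcome_py summary source_families)

-- ===== LEMMAS AND PROOFS =====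

theorem pvMerge_idem (acc : Option Nat) (i : Nat) : pvMerge (pvMerge acc i) i = pvMerge acc i := by
  cases acc <;> simp [pvMerge]

-- folding a segment of keywords that all carry the same priority i merges i iff any keyword matches
theorem pvSegGen (p : String → Bool) (kws : List String) (i : Nat) (acc : Option Nat) :
    ((kws.map (fun k => (k, i))).foldl (fun acc kp => if p kp.1 then pvMerge acc kp.2 else acc) acc)
      = if kws.any p then pvMerge acc i else acc := by
  induction kws generalizing acc with
  | nil => simp
  | cons k rest ih =>
    simp only [List.map_cons, List.foldl_cons, List.any_cons]
    by_cases hb : p k = true <;> simp [hb, ih, pvMerge_idem]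

theorem pvSeg (l : String) (kws : List String) (i : Nat) (acc : Option Nat) :
    ((kws.map (fun k => (k, i))).foldl (pvStep l) acc)
      = if kws.any (fun k => PySem.Str.isIn k l) then pvMerge acc i else acc := by
  simpa only [pvStep] using pvSegGen (fun k => PySem.Str.isIn k l) kws i acc

theorem pvKeywordPriority_decomp :
    pvKeywordPriority
      = (["crash", "account", "private", "spoiler"].map (fun k => (k, 0)))
        ++ (["guide", "copy", "content", "publication"].map (fun k => (k, 1)))
        ++ (["visibility", "search", "crawl"].map (fun k => (k, 2)))
        ++ (["support", "help", "install"].map (fun k => (k, 3)))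
        ++ (["feature", "demand", "roadmap", "queue", "horizon"].map (fun k => (k, 4)))
        ++ (["release", "promise"].map (fun k => (k, 5))) := rfl

-- ===== VERDICT =====
set_option maxHeartbeats 2000000 in
theorem infer_routing_outcome_py_spec : Claim_equal_infer_routing_outcome_py := by
  intro summary source_families _
  unfold Spec_infer_routing_outcome_py infer_routing_outcome_py infer_routing_outcome_py_alt
  simp only [pvKeywordPriority_decomp, List.foldl_append, pvSeg, List.any_cons, List.any_nil,
    Bool.or_false, Bool.or_assoc]
  split_ifs <;> simp_all [pvMerge, pvOutcomes]
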